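-- pv_equiv track=rewrite | github.com/leandrometeoro/POP | render/fill_first_page_xml.py | format_lista_semicolas
-- ===== SOURCE A (Python) =====
-- def format_lista_semicolas(itens):
--     xs = [str(s).strip() for s in (itens or []) if s and str(s).strip()]
--     n = len(xs)
--     if n == 0:
--         return []
--     if n == 1:
--         return [f"{xs[0]}."]
--     if n == 2:
--         return [f"{xs[0]}; e", f"{xs[1]}."]
--     linhas = [f"{xs[i]};" for i in range(0, n-2)]
--     linhas.append(f"{xs[-2]}; e")
--     linhas.append(f"{xs[-1]}.")
--     return linhas
-- ===== SOURCE B (Python) =====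
-- def format_lista_semicolas(itens):
--     xs = [str(s).strip() for s in (itens or []) if s and str(s).strip()]
--     out = []
--     for x in reversed(xs):
--         if not out:
--             out.append(x + ".")
--         elif len(out) == 1:
--             out.append(x + "; e")
--         else:
--             out.append(x + ";")
--     out.reverse()
--     return out
-- ===== Notes on version B (the rewrite author's own statement) =====
-- stated objective: alternative
-- what changed: Builds the lines back-to-front: a single loop over reversed(xs) with an accumulator whose current size picks the terminator ('.' for the first emitted line, '; e' for the second, ';' after), then reverses the accumulator - no length precomputation, no index arithmetic, no n==0/1/2 case analysis.
import Mathlib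
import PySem

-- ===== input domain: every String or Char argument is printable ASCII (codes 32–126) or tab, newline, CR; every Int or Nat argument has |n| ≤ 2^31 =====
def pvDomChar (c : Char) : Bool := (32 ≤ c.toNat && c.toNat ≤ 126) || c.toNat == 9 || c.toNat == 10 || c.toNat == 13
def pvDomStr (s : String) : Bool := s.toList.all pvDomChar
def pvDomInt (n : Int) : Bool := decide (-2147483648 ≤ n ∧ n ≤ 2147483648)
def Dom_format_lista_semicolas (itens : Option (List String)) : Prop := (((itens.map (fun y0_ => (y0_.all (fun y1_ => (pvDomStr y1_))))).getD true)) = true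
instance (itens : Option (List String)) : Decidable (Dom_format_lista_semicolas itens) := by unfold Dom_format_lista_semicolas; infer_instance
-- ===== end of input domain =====

-- B builds the lines back-to-front: one loop over reversed(xs) whose accumulator size picks
-- each terminator ('.', then '; e', then ';'), then a final reverse — no n-case analysis (alternative).

-- shared by both ports: both Python sources start with the identical comprehension
-- xs = [str(s).strip() for s in (itens or []) if s and str(s).strip()]
def pvClean (itens : Option (List String)) : List String :=
  ((itens.getD []).filter (fun s => !(s == "") && !(PySem.Str.strip s == ""))).map PySem.Str.strip

-- ===== PORT A =====
-- xs[i] / xs[-2] / xs[-1]: indices are always in range here, so pyGetD with default "" is exact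
def format_lista_semicolas (itens : Option (List String)) : List String :=
  let xs := pvClean itens
  let n : Int := xs.length
  if n = 0 then []
  else if n = 1 then [PySem.List.pyGetD xs 0 "" ++ "."]
  else if n = 2 then [PySem.List.pyGetD xs 0 "" ++ "; e", PySem.List.pyGetD xs 1 "" ++ "."]
  else
    ((PySem.List.pyRange 0 (n - 2) 1).map (fun i => PySem.List.pyGetD xs i "" ++ ";"))
      ++ [PySem.List.pyGetD xs (-2) "" ++ "; e", PySem.List.pyGetD xs (-1) "" ++ "."]

-- ===== PORT B =====
-- the loop 'for x in reversed(xs): …append…' is a foldl over xs.reverse; out.reverse() at the end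
def format_lista_semicolas_alt (itens : Option (List String)) : List String :=
  let xs := pvClean itens
  let out := xs.reverse.foldl (fun out x =>
    if out = [] then out ++ [x ++ "."]
    else if out.length = 1 then out ++ [x ++ "; e"]
    else out ++ [x ++ ";"]) ([] : List String)
  out.reverse

-- ===== PRECONDITION & SPEC =====
def Spec_format_lista_semicolas (itens : Option (List String)) (out : List String) : Prop := out = format_lista_semicolas_alt itens
instance (itens : Option (List String)) (out : List String) : Decidable (Spec_format_lista_semicolas itens out) := by unfold Spec_format_lista_semicolas; infer_instance

-- ===== CLAIM (what is proved, stated in full; the proofs are below) =====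
def Claim_equal_format_lista_semicolas : Prop := ∀ (itens : Option (List String)), Dom_format_lista_semicolas itens → Spec_format_lista_semicolas itens (format_lista_semicolas itens)

-- ===== LEMMAS AND PROOFS =====

-- negative Python indices resolve to length-relative positions
theorem pyGetD_neg_two (xs : List String) (h : 2 ≤ xs.length) :
    PySem.List.pyGetD xs (-2) "" = xs.getD (xs.length - 2) "" := by
  unfold PySem.List.pyGetD PySem.List.pyGet? PySem.List.pyIdx?
  rw [if_neg (by omega : ¬ (0:Int) ≤ -2), if_pos (by omega : -(xs.length:Int) ≤ -2)]
  simp [List.getD, show ((2 : Int).toNat) = 2 from rfl]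

theorem pyGetD_neg_one (xs : List String) (h : 1 ≤ xs.length) :
    PySem.List.pyGetD xs (-1) "" = xs.getD (xs.length - 1) "" := by
  unfold PySem.List.pyGetD PySem.List.pyGet? PySem.List.pyIdx?
  rw [if_neg (by omega : ¬ (0:Int) ≤ -1), if_pos (by omega : -(xs.length:Int) ≤ -1)]
  simp [List.getD, show ((1 : Int).toNat) = 1 from rfl]

-- range-indexed map is a take
theorem map_getD_range (xs : List String) (m : Nat) (hm : m ≤ xs.length) :
    (List.range m).map (fun k => xs.getD k "") = xs.take m := by
  apply List.ext_getElem
  · simp [hm]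
  · intro k h1 h2
    simp only [List.getElem_map, List.getElem_range, List.getElem_take]
    rw [List.getD_eq_getElem _ _ (by simp at h1; omega)]

-- once the accumulator holds two lines, B's loop only appends ';'-terminated lines
theorem foldB_ge_two (ys : List String) : ∀ (acc : List String), 2 ≤ acc.length →
    ys.foldl (fun out x =>
      if out = [] then out ++ [x ++ "."]
      else if out.length = 1 then out ++ [x ++ "; e"]
      else out ++ [x ++ ";"]) acc = acc ++ ys.map (· ++ ";") := by
  induction ys with
  | nil => intro acc _; simp
  | cons z zs ih =>
    intro acc hacc
    have h0 : ¬ acc = [] := by intro h; subst h; simp at hacc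
    have h1 : ¬ acc.length = 1 := by omega
    simp only [List.foldl_cons, if_neg h0, if_neg h1]
    rw [ih (acc ++ [z ++ ";"]) (by simp; omega)]
    simp

-- the full loop on a reversed list with at least two elements
theorem foldB_cons_cons (a b : String) (rs : List String) :
    (a :: b :: rs).foldl (fun out x =>
      if out = [] then out ++ [x ++ "."]
      else if out.length = 1 then out ++ [x ++ "; e"]
      else out ++ [x ++ ";"]) [] = [a ++ ".", b ++ "; e"] ++ rs.map (· ++ ";") := by
  have h := foldB_ge_two rs [a ++ ".", b ++ "; e"] (by simp)
  simp only [List.foldl_cons]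
  simpa using h

-- ===== VERDICT (by name: the statement is the Claim_ definition above) =====
theorem format_lista_semicolas_spec : Claim_equal_format_lista_semicolas := by
  intro itens _
  unfold Spec_format_lista_semicolas
  simp only [format_lista_semicolas, format_lista_semicolas_alt]
  cases h : (pvClean itens).reverse with
  | nil =>
    have hx : pvClean itens = [] := by
      have := congrArg List.reverse h; simpa using this
    simp [hx]
  | cons a t =>
    have hx : pvClean itens = (a :: t).reverse := by
      have := congrArg List.reverse h; simpa using this
    cases t with
    | nil =>
      rw [hx]
      simp [PySem.List.pyGetD, PySem.List.pyGet?, PySem.List.pyIdx?]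
    | cons b rs =>
      rw [hx, foldB_cons_cons]
      cases rs with
      | nil =>
        simp [PySem.List.pyGetD, PySem.List.pyGet?, PySem.List.pyIdx?]
      | cons z zs =>
        have hxs : (a :: b :: z :: zs).reverse = (z :: zs).reverse ++ [b, a] := by simp
        rw [hxs]
        set L := (z :: zs).reverse with hL
        have hLlen : L.length = zs.length + 1 := by rw [hL]; simp
        have hlen : (L ++ [b, a]).length = L.length + 2 := by simp
        rw [if_neg (by simp only [hlen]; push_cast; omega),
            if_neg (by simp only [hlen]; push_cast; omega),
            if_neg (by simp only [hlen]; push_cast; omega)]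
        rw [pyGetD_neg_two _ (by simp), pyGetD_neg_one _ (by simp)]
        have hgb : (L ++ [b, a]).getD ((L ++ [b, a]).length - 2) "" = b := by
          rw [hlen]
          simp [List.getD]
        have hga : (L ++ [b, a]).getD ((L ++ [b, a]).length - 1) "" = a := by
          rw [hlen]
          rw [show L.length + 2 - 1 = L.length + 1 by omega]
          simp [List.getD]
        rw [hgb, hga]
        -- B's reversed output
        rw [show ([a ++ ".", b ++ "; e"] ++ (z :: zs).map (· ++ ";")).reverse
              = ((z :: zs).map (· ++ ";")).reverse ++ [b ++ "; e", a ++ "."] by simp]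
        rw [show ((z :: zs).map (· ++ ";")).reverse = L.map (· ++ ";") by rw [hL, List.map_reverse]]
        congr 1
        -- A's range part equals (take L.length) mapped, which is L mapped
        have hc : (((L ++ [b, a]).length : Int) - 2) = ((L.length : Nat) : Int) := by
          rw [hlen]; push_cast; omega
        rw [hc, PySem.List.pyRange_one]
        rw [show ((((L.length : Nat)) : Int) - 0).toNat = L.length by omega]
        have htk : (L ++ [b, a]).take L.length = L := by simp
        rw [← htk, ← map_getD_range (L ++ [b, a]) L.length (by simp)]
        simp only [List.map_map, List.length_map, List.length_range]
        refine List.map_congr_left ?_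
        intro k hk
        have hk' : k < L.length := List.mem_range.mp hk
        simp only [Function.comp_apply, zero_add]
        rw [PySem.List.pyGetD_natCast]
        rw [List.getD_append _ _ _ _ (by simp [hk'])]
        simp [List.getD, hk']
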